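-- pv_equiv track=rewrite | github.com/NotRobiin/challenges | python/num_split.py | num_split
-- ===== SOURCE A (Python) =====
-- def num_split(num: int) -> list:
--     s = str(abs(num))[::-1]
--     exp = 1
--     out = []
--
--     for c in s:
--         val = int(c) * exp
--         exp *= 10
--
--         out.append(-val if num < 0 else val)
--
--     return out[::-1]
-- ===== SOURCE B (Python) =====
-- def num_split(num: int) -> list:
--     # Pure integer arithmetic: no string conversion at all.
--     # Find the highest power of ten <= n, then peel off place-value
--     # components top-down by repeated remainder.
--     n = abs(num)
--     sign = -1 if num < 0 else 1
--     p = 1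
--     while p * 10 <= n:
--         p *= 10
--     out = []
--     while p > 0:
--         out.append(sign * (n - n % p))
--         n %= p
--         p //= 10
--     return out
-- ===== Notes on version B (the rewrite author's own statement) =====
-- stated objective: alternative
-- what changed: A converts the number to a string, iterates the reversed digit characters threading a running exponent accumulator and reverses the output; B never touches strings: it finds the highest power of ten <= |num| by multiplication, then peels place-value components top-down with remainder/division arithmetic, emitting the result in final order with no reversal.
import Mathlib
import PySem

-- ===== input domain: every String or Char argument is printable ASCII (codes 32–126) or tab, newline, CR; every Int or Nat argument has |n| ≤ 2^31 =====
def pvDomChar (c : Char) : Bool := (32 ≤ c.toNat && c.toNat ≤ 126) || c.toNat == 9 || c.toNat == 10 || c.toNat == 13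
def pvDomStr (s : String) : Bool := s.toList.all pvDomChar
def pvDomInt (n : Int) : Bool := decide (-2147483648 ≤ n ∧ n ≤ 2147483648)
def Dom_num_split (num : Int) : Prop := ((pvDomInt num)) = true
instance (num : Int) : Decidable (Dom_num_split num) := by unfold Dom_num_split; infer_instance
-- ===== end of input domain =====

-- B replaces A's string-of-digits scan (reverse, running exponent, reverse again)
-- by pure integer arithmetic: find the highest power of ten, then peel components
-- top-down by remainder/division (objective: alternative algorithm, no strings).

-- ===== PORT A =====
-- int(c) for a single character, as Python A calls it; on the digit characters
-- produced by str(abs(num)) it never takes the `.getD` default (Python never raises here).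
def digitInt (c : Char) : Int := (PySem.Int.ofChars? [c]).getD 0

-- s = str(abs(num))[::-1]  ([::-1] is reverse);
-- then the loop threads (exp, out) and the result is out[::-1].
def num_split (num : Int) : List Int :=
  let s : List Char := (PySem.Int.toChars (num.natAbs : Int)).reverse
  let r : Int × List Int :=
    s.foldl (fun st c =>
      let val := digitInt c * st.1
      (st.1 * 10, st.2 ++ [if num < 0 then -val else val])) (1, [])
  r.2.reverse

-- ===== PORT B =====
-- `while p * 10 <= n: p *= 10`; the conjunct 1 ≤ p is a totality guard only:
-- B calls findP with p = 1 and the loop preserves 1 ≤ p.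
def findP (n p : Int) : Int :=
  if _h : 1 ≤ p ∧ p * 10 ≤ n then findP n (p * 10) else p
  termination_by (n + 1 - p).toNat
  decreasing_by omega

-- `while p > 0: out.append(sign * (n - n % p)); n %= p; p //= 10`
-- (emits elements in the order Python appends them)
def loop2 (sign n p : Int) : List Int :=
  if _h : 0 < p then
    sign * (n - PySem.Int.mod n p) ::
      loop2 sign (PySem.Int.mod n p) (PySem.Int.floordiv p 10)
  else []
  termination_by p.toNat
  decreasing_by
    have := PySem.Int.floordiv_eq_ediv_of_pos (a := p) (b := 10) (by norm_num)
    omega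

def num_split_alt (num : Int) : List Int :=
  let n : Int := (num.natAbs : Int)
  let sign : Int := if num < 0 then -1 else 1
  let p : Int := findP n 1
  loop2 sign n p

-- ===== PRECONDITION & SPEC =====
def Spec_num_split (num : Int) (out : List Int) : Prop := out = num_split_alt num
instance (num : Int) (out : List Int) : Decidable (Spec_num_split num out) := by unfold Spec_num_split; infer_instance

-- ===== CLAIM (what is proved, stated in full; the proofs are below) =====
def Claim_equal_num_split : Prop := ∀ (num : Int), Dom_num_split num → Spec_num_split num (num_split num)

-- ===== LEMMAS AND PROOFS =====

-- little-endian decimal digits of a natural number (digsNat 0 = [0])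
def digsNat (n : Nat) : List Nat :=
  if _h : n < 10 then [n] else n % 10 :: digsNat (n / 10)
  termination_by n
  decreasing_by omega

-- little-endian digits padded/truncated to exactly k positions
def digsPad : Nat → Nat → List Nat
  | 0, _ => []
  | k + 1, n => n % 10 :: digsPad k (n / 10)

-- place-value components of a little-endian digit list, starting at weight e
def comps (sign : Int) : List Nat → Int → List Int
  | [], _ => []
  | d :: l, e => sign * d * e :: comps sign l (e * 10)

-- the values A's loop appends, as a structural recursion on the digit-char list
def expMap (g : Char → Int) : List Char → Int → List Int
  | [], _ => []
  | c :: l, e => g c * e :: expMap g l (e * 10)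

theorem foldl_expMap (g : Char → Int) (l : List Char) (e : Int) (acc : List Int) :
    (l.foldl (fun (st : Int × List Int) c => (st.1 * 10, st.2 ++ [g c * st.1])) (e, acc)).2
      = acc ++ expMap g l e := by
  induction l generalizing e acc with
  | nil => simp [expMap]
  | cons c l ih => simp [expMap, ih]

-- A's result, in closed form over the reversed digit-char list
theorem num_split_eq (num : Int) :
    num_split num =
      (expMap (fun c => if num < 0 then -digitInt c else digitInt c)
        ((PySem.Int.toChars (num.natAbs : Int)).reverse) 1).reverse := by
  unfold num_split
  have hfun : (fun (st : Int × List Int) (c : Char) =>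
      let val := digitInt c * st.1
      (st.1 * 10, st.2 ++ [if num < 0 then -val else val]))
    = (fun (st : Int × List Int) c =>
      (st.1 * 10, st.2 ++ [(if num < 0 then -digitInt c else digitInt c) * st.1])) := by
    funext st c
    simp only
    split_ifs <;> simp [neg_mul]
  rw [hfun]
  simp only [foldl_expMap, List.nil_append]

theorem toDigitsCore_eq (fuel n : Nat) (acc : List Char) (h : n < fuel) :
    Nat.toDigitsCore 10 fuel n acc = ((digsNat n).map Nat.digitChar).reverse ++ acc := by
  induction fuel generalizing n acc with
  | zero => omega
  | succ fuel ih =>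
    rw [Nat.toDigitsCore]
    by_cases h10 : n < 10
    · have hd : n / 10 = 0 := by omega
      rw [digsNat]
      simp [hd, h10, Nat.mod_eq_of_lt h10]
    · have hd : n / 10 ≠ 0 := by omega
      rw [digsNat]
      simp only [h10, dite_false, if_neg hd]
      rw [ih (n / 10) _ (by omega)]
      simp

theorem toChars_natAbs (num : Int) :
    PySem.Int.toChars (num.natAbs : Int) = ((digsNat num.natAbs).map Nat.digitChar).reverse := by
  unfold PySem.Int.toChars
  have : ¬ ((num.natAbs : Int) < 0) := Int.not_lt.mpr (Int.natCast_nonneg _)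
  rw [if_neg this, Int.toNat_natCast, Nat.toDigits]
  simpa using toDigitsCore_eq (num.natAbs + 1) num.natAbs [] (by omega)

theorem digsNat_lt (n : Nat) : ∀ d ∈ digsNat n, d < 10 := by
  induction n using digsNat.induct with
  | case1 n h => rw [digsNat]; simp [h]
  | case2 n h ih =>
    rw [digsNat]
    simp only [h, dite_false, List.mem_cons]
    intro d hd
    rcases hd with rfl | hd
    · omega
    · exact ih d hd

theorem digitInt_digitChar (d : Nat) (h : d < 10) : digitInt (Nat.digitChar d) = (d : Int) := by
  interval_cases d <;> decide

theorem expMap_comps (sign : Int) (g : Char → Int)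
    (l : List Nat) (hl : ∀ d ∈ l, d < 10)
    (hg : ∀ d < 10, g (Nat.digitChar d) = sign * d) :
    ∀ e, expMap g (l.map Nat.digitChar) e = comps sign l e := by
  induction l with
  | nil => intro e; rfl
  | cons d l ih =>
    intro e
    have hd : d < 10 := hl d (List.mem_cons_self ..)
    simp only [List.map_cons, expMap, comps, hg d hd]
    rw [ih (fun x hx => hl x (List.mem_cons_of_mem _ hx))]

theorem lt_pow_len (n : Nat) : n < 10 ^ (digsNat n).length := by
  induction n using digsNat.induct with
  | case1 n h => rw [digsNat]; simp [h]
  | case2 n h ih =>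
    rw [digsNat]
    simp only [h, dite_false, List.length_cons, pow_succ]
    omega

theorem len_digsNat_eq (j : Nat) : ∀ m : Nat, m < 10 ^ (j + 1) → (10 ^ j ≤ m ∨ j = 0) →
    (digsNat m).length = j + 1 := by
  induction j with
  | zero =>
    intro m h1 _
    rw [digsNat]
    simp [show m < 10 by omega]
  | succ j ih =>
    intro m h1 h2
    have hle : 10 ^ (j + 1) ≤ m := by
      rcases h2 with h | h
      · exact h
      · omega
    have h10 : ¬ m < 10 := by
      have : (10:Nat) ≤ 10 ^ (j + 1) := by
        calc (10:Nat) = 10 ^ 1 := by norm_num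
        _ ≤ 10 ^ (j + 1) := Nat.pow_le_pow_right (by norm_num) (by omega)
      omega
    rw [digsNat]
    simp only [h10, dite_false, List.length_cons]
    rw [ih (m / 10)]
    · rw [pow_succ] at h1; omega
    · left
      rw [pow_succ] at hle
      omega

theorem digsPad_len (k : Nat) : ∀ n, (digsPad k n).length = k := by
  induction k with
  | zero => intro n; rfl
  | succ k ih => intro n; simp [digsPad, ih]

theorem digsPad_eq_digsNat (n : Nat) : digsPad (digsNat n).length n = digsNat n := by
  induction n using digsNat.induct with
  | case1 n h =>
    rw [digsNat]
    simp [h, digsPad, Nat.mod_eq_of_lt h]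
  | case2 n h ih =>
    rw [digsNat]
    simp only [h, dite_false, List.length_cons, digsPad, List.cons.injEq, true_and]
    exact ih

theorem digsPad_split (k : Nat) : ∀ n, n < 10 ^ (k + 1) →
    digsPad (k + 1) n = digsPad k (n % 10 ^ k) ++ [n / 10 ^ k] := by
  induction k with
  | zero =>
    intro n h
    have h10 : n < 10 := by simpa using h
    simp [digsPad, Nat.mod_eq_of_lt h10]
  | succ k ih =>
    intro n h
    have e1 : n % 10 ^ (k + 1) % 10 = n % 10 :=
      Nat.mod_mod_of_dvd n ⟨10 ^ k, by ring⟩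
    have e2 : n % 10 ^ (k + 1) / 10 = n / 10 % 10 ^ k := by
      rw [show (10:Nat) ^ (k+1) = 10 * 10 ^ k by ring]
      exact Nat.mod_mul_right_div_self n 10 (10 ^ k)
    have e3 : n / 10 / 10 ^ k = n / 10 ^ (k + 1) := by
      rw [Nat.div_div_eq_div_mul, pow_succ']
    have hlt : n / 10 < 10 ^ (k + 1) := by
      rw [pow_succ] at h ⊢
      omega
    calc digsPad (k + 2) n
        = n % 10 :: digsPad (k + 1) (n / 10) := rfl
      _ = n % 10 :: (digsPad k (n / 10 % 10 ^ k) ++ [n / 10 / 10 ^ k]) := by rw [ih _ hlt]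
      _ = digsPad (k + 1) (n % 10 ^ (k + 1)) ++ [n / 10 ^ (k + 1)] := by
          simp [digsPad, e1, e2, e3]

theorem comps_append (sign : Int) (xs ys : List Nat) :
    ∀ e, comps sign (xs ++ ys) e = comps sign xs e ++ comps sign ys (e * 10 ^ xs.length) := by
  induction xs with
  | nil => intro e; simp [comps]
  | cons d xs ih =>
    intro e
    simp only [List.cons_append, comps, List.length_cons, ih (e * 10)]
    ring_nf

theorem digsNat_ne_nil (n : Nat) : digsNat n ≠ [] := by
  rw [digsNat]
  split <;> simp

theorem findP_eq (m : Nat) : ∀ t j : Nat, (digsNat m).length - j = t →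
    (10 ^ j ≤ m ∨ j = 0) →
    findP (m : Int) ((10 : Int) ^ j) = (10 : Int) ^ ((digsNat m).length - 1) := by
  intro t
  induction t with
  | zero =>
    intro j ht hj
    exfalso
    have hlen : 1 ≤ (digsNat m).length :=
      List.length_pos_of_ne_nil (digsNat_ne_nil m)
    have hm : m < 10 ^ (digsNat m).length := lt_pow_len m
    rcases hj with h | rfl
    · have : 10 ^ j < 10 ^ (digsNat m).length := lt_of_le_of_lt h hm
      have : j < (digsNat m).length :=
        (Nat.pow_lt_pow_iff_right (by norm_num)).mp this
      omega
    · omega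
  | succ t ih =>
    intro j ht hj
    by_cases hc : 10 ^ (j + 1) ≤ m
    · have hcond : (1 : Int) ≤ (10 : Int) ^ j ∧ (10 : Int) ^ j * 10 ≤ (m : Int) := by
        refine ⟨one_le_pow₀ (by norm_num), ?_⟩
        have h1 : ((10 : Int) ^ (j + 1)) ≤ (m : Int) := by exact_mod_cast hc
        calc (10 : Int) ^ j * 10 = (10 : Int) ^ (j + 1) := by ring
          _ ≤ (m : Int) := h1
      rw [findP, dif_pos hcond]
      have he : (10 : Int) ^ j * 10 = (10 : Int) ^ (j + 1) := by ring
      rw [he]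
      apply ih (j + 1)
      · have hm : m < 10 ^ (digsNat m).length := lt_pow_len m
        have : j + 1 < (digsNat m).length :=
          (Nat.pow_lt_pow_iff_right (by norm_num)).mp (lt_of_le_of_lt hc hm)
        omega
      · exact Or.inl hc
    · have hcond : ¬ ((1 : Int) ≤ (10 : Int) ^ j ∧ (10 : Int) ^ j * 10 ≤ (m : Int)) := by
        rintro ⟨-, h2⟩
        apply hc
        have h3 : ((10 : Int) ^ (j + 1)) ≤ (m : Int) := by
          calc ((10 : Int) ^ (j + 1)) = (10 : Int) ^ j * 10 := by ring
            _ ≤ (m : Int) := h2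
        exact_mod_cast h3
      rw [findP, dif_neg hcond]
      have hlen : (digsNat m).length = j + 1 :=
        len_digsNat_eq j m (by omega) hj
      rw [hlen]
      simp

theorem loop2_eq (sign : Int) (k : Nat) : ∀ n : Nat, n < 10 ^ (k + 1) →
    loop2 sign (n : Int) ((10 : Int) ^ k) = (comps sign (digsPad (k + 1) n) 1).reverse := by
  induction k with
  | zero =>
    intro n h
    rw [loop2, dif_pos (by norm_num : (0 : Int) < (10 : Int) ^ 0)]
    have hm : PySem.Int.mod (n : Int) ((10 : Int) ^ 0) = 0 := by
      rw [pow_zero, PySem.Int.mod_eq_emod_of_pos (by norm_num), Int.emod_one]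
    have hd : PySem.Int.floordiv ((10 : Int) ^ 0) 10 = 0 := by
      rw [pow_zero, PySem.Int.floordiv_eq_ediv_of_pos (by norm_num)]
      decide
    rw [hm, hd, loop2, dif_neg (by norm_num : ¬ (0 : Int) < (0 : Int))]
    have hn : n % 10 = n := Nat.mod_eq_of_lt (by simpa using h)
    simp [digsPad, comps, hn]
  | succ k ih =>
    intro n h
    have hp : (0 : Int) < (10 : Int) ^ (k + 1) := by positivity
    rw [loop2, dif_pos hp]
    have hm : PySem.Int.mod (n : Int) ((10 : Int) ^ (k + 1)) = ((n % 10 ^ (k + 1) : Nat) : Int) := by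
      rw [PySem.Int.mod_eq_emod_of_pos hp]
      push_cast
      rfl
    have hd : PySem.Int.floordiv ((10 : Int) ^ (k + 1)) 10 = (10 : Int) ^ k := by
      rw [PySem.Int.floordiv_eq_ediv_of_pos (by norm_num), pow_succ,
        Int.mul_ediv_cancel _ (by norm_num)]
    rw [hm, hd, ih _ (Nat.mod_lt _ (by positivity))]
    rw [digsPad_split (k + 1) n h, comps_append]
    simp only [List.reverse_append, digsPad_len, comps, List.reverse_cons,
      List.reverse_nil, List.nil_append, one_mul, List.cons_append]
    congr 1
    have hdm : (10 : Nat) ^ (k + 1) * (n / 10 ^ (k + 1)) + n % 10 ^ (k + 1) = n :=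
      Nat.div_add_mod n (10 ^ (k + 1))
    have hdm2 : ((10 : Int)) ^ (k + 1) * ((n / 10 ^ (k + 1) : Nat) : Int)
        + ((n % 10 ^ (k + 1) : Nat) : Int) = (n : Int) := by exact_mod_cast hdm
    have hsub : ((n : Int) - ((n % 10 ^ (k + 1) : Nat) : Int))
        = ((n / 10 ^ (k + 1) : Nat) : Int) * (10 : Int) ^ (k + 1) := by
      linear_combination -hdm2
    rw [hsub]
    ring

theorem num_split_spec' (num : Int) : num_split num = num_split_alt num := by
  rw [num_split_eq]
  unfold num_split_alt
  simp only
  set m := num.natAbs with hm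
  set sign : Int := if num < 0 then -1 else 1 with hsign
  have hg : ∀ d < 10, (if num < 0 then -digitInt (Nat.digitChar d) else digitInt (Nat.digitChar d)) = sign * d := by
    intro d hd
    rw [digitInt_digitChar d hd, hsign]
    split_ifs <;> ring
  rw [toChars_natAbs, List.reverse_reverse,
    expMap_comps sign _ _ (digsNat_lt m) hg 1]
  have hfind : findP (m : Int) 1 = (10 : Int) ^ ((digsNat m).length - 1) := by
    have := findP_eq m ((digsNat m).length - 0) 0 rfl (Or.inr rfl)
    simpa using this
  rw [hfind]
  have hlen : 1 ≤ (digsNat m).length :=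
    List.length_pos_of_ne_nil (digsNat_ne_nil m)
  have hk : (digsNat m).length - 1 + 1 = (digsNat m).length := by omega
  rw [loop2_eq sign ((digsNat m).length - 1) m (by rw [hk]; exact lt_pow_len m),
    hk, digsPad_eq_digsNat]

-- ===== VERDICT (by name: the statement is the Claim_ definition above) =====
theorem num_split_spec : Claim_equal_num_split := by
  intro num _
  exact num_split_spec' num
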